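-- pv_equiv track=rewrite | github.com/shartser-leonid/general | website/memorygame/gamelogic.py | mark_to_letter
-- ===== SOURCE A (Python) =====
-- def mark_to_letter(mark):
--     marks={(95,101) : 'A+',\
--             (90,95) : 'A',\
--             (81,90) : 'A-',\
--             (78,81) : 'B+',\
--             (75,78) : 'B',\
--             (72,75) : 'B-',\
--             (68,72) : 'C+',\
--             (65,68) : 'C',\
--             (62,65) : 'C-',\
--             (58,62) : 'D+',\
--             (55,58) : 'D',\
--             (52,55) : 'D-',\
--             (-1,52) : 'R',\
--             }
--     for i in marks:
--         if mark>=i[0] and mark<i[1]: return marks[i]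
-- ===== SOURCE B (Python) =====
-- _BOUNDS = [-1, 52, 55, 58, 62, 65, 68, 72, 75, 78, 81, 90, 95, 101]
-- _GRADES = ['R', 'D-', 'D', 'D+', 'C-', 'C', 'C+', 'B-', 'B', 'B+', 'A-', 'A', 'A+']
--
--
-- def mark_to_letter(mark):
--     if mark < -1 or mark >= 101:
--         return None
--     # binary search for the rightmost bound <= mark (bisect_right by hand)
--     lo, hi = 0, len(_BOUNDS)
--     while lo < hi:
--         mid = (lo + hi) // 2
--         if mark < _BOUNDS[mid]:
--             hi = mid
--         else:
--             lo = mid + 1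
--     return _GRADES[lo - 1]
-- ===== Notes on version B (the rewrite author's own statement) =====
-- stated objective: alternative
-- what changed: Replaced the linear scan over a dict of (lo,hi) ranges with a hand-written binary search (bisect_right) over a sorted list of lower bounds indexing a parallel grade table.
import Mathlib
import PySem

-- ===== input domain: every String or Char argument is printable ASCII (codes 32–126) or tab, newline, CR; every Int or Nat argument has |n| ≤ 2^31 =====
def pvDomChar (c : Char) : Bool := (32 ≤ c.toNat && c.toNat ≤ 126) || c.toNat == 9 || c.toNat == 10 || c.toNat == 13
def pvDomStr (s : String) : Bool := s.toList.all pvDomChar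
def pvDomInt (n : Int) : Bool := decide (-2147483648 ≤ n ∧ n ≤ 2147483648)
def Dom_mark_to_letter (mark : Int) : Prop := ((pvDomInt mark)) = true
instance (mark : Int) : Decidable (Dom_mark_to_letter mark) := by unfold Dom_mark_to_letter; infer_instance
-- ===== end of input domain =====

-- B replaces A's linear scan over a dict of ranges by a binary search over sorted lower bounds (alternative decomposition; return value only).

-- ===== PORT A =====
-- A's dict of ((lo,hi), grade) in insertion order; the loop returns the first matching range.
def marksTable : List ((Int × Int) × String) :=
  [((95, 101), "A+"), ((90, 95), "A"), ((81, 90), "A-"), ((78, 81), "B+"),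
   ((75, 78), "B"), ((72, 75), "B-"), ((68, 72), "C+"), ((65, 68), "C"),
   ((62, 65), "C-"), ((58, 62), "D+"), ((55, 58), "D"), ((52, 55), "D-"),
   ((-1, 52), "R")]

def marksLoop (mark : Int) : List ((Int × Int) × String) → Option String
  | [] => none
  | ((lo, hi), g) :: rest => if lo ≤ mark ∧ mark < hi then some g else marksLoop mark rest

def mark_to_letter (mark : Int) : Option String := marksLoop mark marksTable

-- ===== PORT B =====
def bBounds : List Int := [-1, 52, 55, 58, 62, 65, 68, 72, 75, 78, 81, 90, 95, 101]
def bGrades : List String := ["R", "D-", "D", "D+", "C-", "C", "C+", "B-", "B", "B+", "A-", "A", "A+"]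

-- the while-loop of Source B's hand-written bisect_right, recursion on hi - lo
def bsearch (mark : Int) (lo hi : Nat) : Nat :=
  if h : lo < hi then
    let mid := (lo + hi) / 2
    if mark < bBounds.getD mid 0 then bsearch mark lo mid
    else bsearch mark (mid + 1) hi
  else lo
termination_by hi - lo
decreasing_by all_goals omega

def mark_to_letter_alt (mark : Int) : Option String :=
  if mark < -1 ∨ 101 ≤ mark then none
  else some (bGrades.getD (bsearch mark 0 bBounds.length - 1) "")

-- ===== PRECONDITION & SPEC =====
def Spec_mark_to_letter (mark : Int) (out : Option String) : Prop := out = mark_to_letter_alt mark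
instance (mark : Int) (out : Option String) : Decidable (Spec_mark_to_letter mark out) := by unfold Spec_mark_to_letter; infer_instance

-- ===== CLAIM (what is proved, stated in full; the proofs are below) =====
def Claim_equal_mark_to_letter : Prop := ∀ (mark : Int), Dom_mark_to_letter mark → Spec_mark_to_letter mark (mark_to_letter mark)

-- ===== LEMMAS AND PROOFS =====

-- bsearch on the concrete bounds table, fully unfolded into its comparison tree
lemma bs_eval (mark : Int) : bsearch mark 0 14 =
    if mark < 72 then
      (if mark < 58 then
        (if mark < 52 then (if mark < -1 then 0 else 1) else (if mark < 55 then 2 else 3))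
       else
        (if mark < 65 then (if mark < 62 then 4 else 5) else (if mark < 68 then 6 else 7)))
    else
      (if mark < 90 then
        (if mark < 78 then (if mark < 75 then 8 else 9) else (if mark < 81 then 10 else 11))
       else
        (if mark < 101 then (if mark < 95 then 12 else 13) else 14)) := by
  repeat (rw [bsearch.eq_def]; norm_num [bBounds])

-- ===== VERDICT (by name: the statement is the Claim_ definition above) =====
set_option maxHeartbeats 1000000 in
theorem mark_to_letter_spec : Claim_equal_mark_to_letter := by
  intro mark _
  unfold Spec_mark_to_letter
  by_cases h1 : mark < -1
  · unfold mark_to_letter mark_to_letter_alt marksTable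
    simp only [marksLoop]
    rw [if_pos (Or.inl h1)]
    repeat rw [if_neg (by omega)]
  · by_cases h2 : 101 ≤ mark
    · unfold mark_to_letter mark_to_letter_alt marksTable
      simp only [marksLoop]
      rw [if_pos (Or.inr h2)]
      repeat rw [if_neg (by omega)]
    · have hA : -1 ≤ mark := by omega
      have hB : mark ≤ 100 := by omega
      unfold mark_to_letter mark_to_letter_alt marksTable
      simp only [marksLoop, bBounds, List.length]
      rw [bs_eval]
      interval_cases mark <;> decide
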